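-- pv_equiv track=rewrite | github.com/Garden-AI/rootstock | rootstock/clusters.py | parse_model_string
-- ===== SOURCE A (Python) =====
-- KNOWN_ENVIRONMENTS = ["mace", "chgnet", "orb", "alignn"]
--
-- def parse_model_string(model: str) -> tuple[str, str]:
--     """
--     Parse model string into (environment_name, model_arg).
--
--     The model string format is:
--         "{environment_name}" or "{environment_name}-{model_arg}"
--
--     Examples:
--         "mace-medium" -> ("mace", "medium")
--         "mace-small" -> ("mace", "small")
--         "mace-/path/to/custom.pt" -> ("mace", "/path/to/custom.pt")
--         "chgnet" -> ("chgnet", "")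
--         "chgnet-0.3.0" -> ("chgnet", "0.3.0")
--
--     Args:
--         model: Model identifier string.
--
--     Returns:
--         Tuple of (environment_name, model_arg).
--     """
--     for env in KNOWN_ENVIRONMENTS:
--         if model == env:
--             return (env, "")
--         if model.startswith(f"{env}-"):
--             model_arg = model[len(env) + 1 :]  # Everything after "env-"
--             return (env, model_arg)
--
--     # Unknown format - treat entire string as environment name
--     return (model, "")
-- ===== SOURCE B (Python) =====
-- KNOWN_ENVIRONMENTS = ["mace", "chgnet", "orb", "alignn"]
-- _KNOWN = frozenset(KNOWN_ENVIRONMENTS)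
--
-- def parse_model_string(model: str) -> tuple[str, str]:
--     head, sep, tail = model.partition("-")
--     if sep and head in _KNOWN:
--         return (head, tail)
--     return (model, "")
-- ===== Notes on version B (the rewrite author's own statement) =====
-- stated objective: idiomatic
-- what changed: B splits the string once at the first dash with str.partition and tests the head against a set of known environments, replacing A's loop that, for each known environment, compares the whole string and tests a dash-suffixed prefix.
import Mathlib
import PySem

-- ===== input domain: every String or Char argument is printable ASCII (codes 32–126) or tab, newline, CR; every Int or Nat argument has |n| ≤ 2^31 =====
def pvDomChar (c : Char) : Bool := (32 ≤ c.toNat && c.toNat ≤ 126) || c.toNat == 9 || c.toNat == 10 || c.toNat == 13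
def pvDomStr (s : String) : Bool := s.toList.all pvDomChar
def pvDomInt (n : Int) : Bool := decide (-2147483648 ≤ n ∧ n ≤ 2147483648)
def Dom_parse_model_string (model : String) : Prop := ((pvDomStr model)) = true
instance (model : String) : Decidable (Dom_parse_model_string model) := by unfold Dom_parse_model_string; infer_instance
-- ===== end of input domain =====

-- B replaces A's per-environment equality/prefix scan by one partition at the first dash plus a set membership test (idiomatic).

-- ===== PORT A =====
-- KNOWN_ENVIRONMENTS = ["mace", "chgnet", "orb", "alignn"]
def pmsKnownEnvironments : List (List Char) :=
  ["mace".toList, "chgnet".toList, "orb".toList, "alignn".toList]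

-- 'for env in KNOWN_ENVIRONMENTS: …' with its two early returns; fall-through returns (model, "")
def pmsLoopA (model : List Char) : List (List Char) → List Char × List Char
  | [] => (model, [])
  | env :: rest =>
    if model = env then (env, [])
    else if PySem.Chars.startswith model (env ++ ['-']) then
      (env, PySem.Chars.slice model (some ((env.length : Int) + 1)) none)   -- model[len(env)+1:]
    else pmsLoopA model rest

def parse_model_string (model : String) : String × String :=
  match pmsLoopA model.toList pmsKnownEnvironments with
  | (e, a) => (String.ofList e, String.ofList a)

-- ===== PORT B =====
-- frozenset(KNOWN_ENVIRONMENTS)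
def pmsKnownSet : PySem.Set (List Char) :=
  PySem.Set.ofList ["mace".toList, "chgnet".toList, "orb".toList, "alignn".toList]

def pmsNotDash (c : Char) : Bool := c ≠ '-'

-- model.partition("-") -> (head, sep, tail)
def pmsPartition (cs : List Char) : List Char × List Char × List Char :=
  let head := cs.takeWhile pmsNotDash
  if head.length < cs.length then (head, ['-'], cs.drop (head.length + 1))
  else (cs, [], [])

def parse_model_string_alt (model : String) : String × String :=
  match pmsPartition model.toList with
  | (head, sep, tail) =>
    if sep.length ≠ 0 ∧ PySem.Set.contains pmsKnownSet head = true then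
      (String.ofList head, String.ofList tail)
    else (model, "")

-- ===== PRECONDITION & SPEC =====
def Spec_parse_model_string (model : String) (out : String × String) : Prop := out = parse_model_string_alt model
instance (model : String) (out : String × String) : Decidable (Spec_parse_model_string model out) := by unfold Spec_parse_model_string; infer_instance

-- ===== CLAIM (what is proved, stated in full; the proofs are below) =====
def Claim_equal_parse_model_string : Prop := ∀ (model : String), Dom_parse_model_string model → Spec_parse_model_string model (parse_model_string model)

-- ===== LEMMAS AND PROOFS =====

theorem pms_takeWhile_self (env : List Char) (hne : '-' ∉ env) :
    env.takeWhile pmsNotDash = env := by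
  apply List.takeWhile_eq_self_iff.mpr
  intro x hx
  simp only [pmsNotDash, decide_eq_true_iff]
  rintro rfl; exact hne hx

-- A's 'model.startswith(env + "-")' test, characterised through B's partition head.
theorem pms_startswith_iff (cs env : List Char) (hne : '-' ∉ env) :
    PySem.Chars.startswith cs (env ++ ['-']) = true ↔
      cs.takeWhile pmsNotDash = env ∧ env.length < cs.length := by
  rw [PySem.Chars.startswith_iff]
  constructor
  · rintro ⟨t, rfl⟩
    have hall : ∀ x ∈ env, pmsNotDash x := by
      intro x hx
      simp only [pmsNotDash, decide_eq_true_iff]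
      rintro rfl; exact hne hx
    constructor
    · rw [List.append_assoc, List.takeWhile_append_of_pos hall]
      have : List.takeWhile pmsNotDash (['-'] ++ t) = [] := by
        simp [pmsNotDash]
      rw [this, List.append_nil]
    · simp
  · rintro ⟨hh, hl⟩
    have hsplit := List.takeWhile_append_dropWhile (p := pmsNotDash) (l := cs)
    have hdne : cs.dropWhile pmsNotDash ≠ [] := by
      intro h0
      rw [h0, List.append_nil, hh] at hsplit
      rw [← hsplit] at hl
      omega
    have hhead := List.head_dropWhile_not pmsNotDash hdne
    obtain ⟨c, t, hct⟩ := List.exists_cons_of_ne_nil hdne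
    have hc : c = '-' := by
      simp only [hct, List.head_cons] at hhead
      simpa [pmsNotDash] using hhead
    refine ⟨t, ?_⟩
    rw [← hsplit, hh, hct, hc]
    simp

-- A's loop over a dash-free environment list, written as B computes it.
theorem pms_loop_eq (cs : List Char) (L : List (List Char))
    (hL : ∀ env ∈ L, '-' ∉ env) :
    pmsLoopA cs L =
      (if (cs.takeWhile pmsNotDash).length < cs.length ∧ cs.takeWhile pmsNotDash ∈ L then
        (cs.takeWhile pmsNotDash, cs.drop ((cs.takeWhile pmsNotDash).length + 1))
      else (cs, [])) := by
  induction L with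
  | nil => simp [pmsLoopA]
  | cons env rest ih =>
    have henv : '-' ∉ env := hL env (by simp)
    rw [pmsLoopA]
    by_cases h1 : cs = env
    · rw [if_pos h1]
      have hne : ¬ ((cs.takeWhile pmsNotDash).length < cs.length ∧ cs.takeWhile pmsNotDash ∈ env :: rest) := by
        rintro ⟨hlt, _⟩
        rw [h1, pms_takeWhile_self env henv] at hlt
        omega
      rw [if_neg hne, h1]
    · rw [if_neg h1]
      by_cases h2 : PySem.Chars.startswith cs (env ++ ['-']) = true
      · rw [if_pos h2]
        obtain ⟨hh, hl⟩ := (pms_startswith_iff cs env henv).mp h2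
        have hcond : (cs.takeWhile pmsNotDash).length < cs.length ∧ cs.takeWhile pmsNotDash ∈ env :: rest := by
          rw [hh]; exact ⟨hl, List.mem_cons_self⟩
        rw [if_pos hcond, hh]
        have hcast : ((env.length : Int) + 1) = ((env.length + 1 : Nat) : Int) := by push_cast; ring
        simp only [PySem.Chars.slice_eq_listSlice, hcast, PySem.List.slice_from_natCast]
      · rw [if_neg h2]
        rw [ih (fun e he => hL e (List.mem_cons_of_mem env he))]
        by_cases h3 : (cs.takeWhile pmsNotDash).length < cs.length ∧ cs.takeWhile pmsNotDash ∈ rest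
        · rw [if_pos h3, if_pos ⟨h3.1, List.mem_cons_of_mem env h3.2⟩]
        · rw [if_neg h3]
          have h4 : ¬ ((cs.takeWhile pmsNotDash).length < cs.length ∧ cs.takeWhile pmsNotDash ∈ env :: rest) := by
            rintro ⟨hlt, hmem⟩
            rcases List.mem_cons.mp hmem with heq | hmem'
            · exact h2 ((pms_startswith_iff cs env henv).mpr ⟨heq, heq ▸ hlt⟩)
            · exact h3 ⟨hlt, hmem'⟩
          rw [if_neg h4]

theorem pms_set_eq_envs : (pmsKnownSet : List (List Char)) = pmsKnownEnvironments := by decide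

-- ===== VERDICT (by name: the statement is the Claim_ definition above) =====
theorem parse_model_string_spec : Claim_equal_parse_model_string := by
  intro model _
  unfold Spec_parse_model_string parse_model_string parse_model_string_alt pmsPartition
  rw [pms_loop_eq model.toList pmsKnownEnvironments (by decide)]
  by_cases hlt : (model.toList.takeWhile pmsNotDash).length < model.toList.length
  · rw [if_pos hlt]
    by_cases hmem : model.toList.takeWhile pmsNotDash ∈ pmsKnownEnvironments
    · have hmem' : model.toList.takeWhile pmsNotDash ∈ pmsKnownSet := by
        rw [pms_set_eq_envs]; exact hmem
      rw [if_pos ⟨hlt, hmem⟩]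
      simp [hmem']
    · have hmem' : model.toList.takeWhile pmsNotDash ∉ pmsKnownSet := by
        rw [pms_set_eq_envs]; exact hmem
      rw [if_neg (fun hcond => hmem hcond.2)]
      simp [hmem', String.ofList_toList]
  · rw [if_neg hlt, if_neg (fun hcond => hlt hcond.1)]
    simp [String.ofList_toList]
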